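-- pv_equiv track=rewrite | github.com/mariellewalet/DCP | problem_172.py | find_concat
-- ===== SOURCE A (Python) =====
-- def find_concat(string: str, words: list):
--     # First implementation : barbaric mode
--     length_string = len(string)
--     total_length = len(words)*len(words[0])
--     if length_string < total_length:
--         return []
--
--
--     indices = []
--     for word in words:
--         index = string.find(word)
--         start = index
--
--         while start < length_string and index >= 0:
--
--             substring = string[index: total_length+index]
--
--             for i in words:
--                 if i not in substring:
--                     break
--             else:
--                 indices.append(index)
--             start = index+1
--             index = string.find(word, start)
--
--     return indices
-- ===== SOURCE B (Python) =====
-- def find_concat(string: str, words: list):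
--     # Index-based reimplementation: precompute each distinct word's occurrence
--     # positions once, then accept a start p iff every word has an occurrence
--     # inside [p, p + total_length - len(word)] -- no window slicing or substring scans.
--     n = len(string)
--     total = len(words) * len(words[0])
--     if n < total:
--         return []
--     occ = {w: [j for j in range(n - len(w) + 1) if string.startswith(w, j)]
--            for w in words}
--     result = []
--     for word in words:
--         for p in occ[word]:
--             if all(any(p <= q <= p + total - len(w) for q in occ[w]) for w in words):
--                 result.append(p)
--     return result
-- ===== Notes on version B (the rewrite author's own statement) =====
-- stated objective: alternative
-- what changed: B precomputes each distinct word's occurrence-position list once and accepts a window start p by checking, per word, whether an occurrence lies in [p, p+total-len(word)], replacing A's per-candidate window slicing and substring scans; dict/position-list index instead of repeated str.find chains.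
-- intended difference: When every word is the empty string, A's 'start < len(string)' loop guard stops its enumeration of occurrences of '' one position early (it never reports position len(string), and reports nothing at all for the empty string), while B naturally reports every position 0..len(string) for each word, which is where '' genuinely occurs; e.g. A('a',['']) = [0] but B('a',['']) = [0, 1]. — e.g. on find_concat("a", [""]): A returns [0], B returns [0, 1]
import Mathlib
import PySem

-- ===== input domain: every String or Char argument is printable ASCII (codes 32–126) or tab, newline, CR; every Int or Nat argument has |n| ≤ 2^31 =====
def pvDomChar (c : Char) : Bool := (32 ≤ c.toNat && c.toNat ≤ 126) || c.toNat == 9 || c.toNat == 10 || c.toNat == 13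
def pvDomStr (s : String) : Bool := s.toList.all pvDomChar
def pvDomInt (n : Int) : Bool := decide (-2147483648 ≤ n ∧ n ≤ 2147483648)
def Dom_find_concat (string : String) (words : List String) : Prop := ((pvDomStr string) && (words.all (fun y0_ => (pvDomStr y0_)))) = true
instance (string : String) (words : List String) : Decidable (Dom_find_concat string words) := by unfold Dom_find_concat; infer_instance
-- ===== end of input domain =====

-- B replaces A's per-candidate window slicing + substring scans by occurrence-position
-- lists computed once per distinct word and interval checks on them (objective: alternative).

-- ===== PORT A =====
-- A's while-loop; one parameter per Python variable, fuel bounds the iterations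
-- (start strictly increases and the loop needs start < length_string).
def pvAWhile (s : List Char) (ws : List (List Char)) (length_string total_length : Int)
    (word : List Char) (fuel : Nat) (indices : List Int) (index start : Int) : List Int :=
  match fuel with
  | 0 => indices
  | fuel + 1 =>
    if start < length_string ∧ 0 ≤ index then
      let substring := PySem.List.slice s (some index) (some (total_length + index))
      let indices' := if ws.all (fun i => PySem.Chars.isIn i substring) then indices ++ [index] else indices
      pvAWhile s ws length_string total_length word fuel indices'
        (PySem.Chars.findFrom s word (index + 1)) (index + 1)
    else indices

def find_concat (string : String) (words : List String) : List Int :=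
  let s := string.toList
  let ws := words.map String.toList
  let length_string : Int := PySem.Chars.len s
  let total_length : Int := PySem.List.len words * PySem.Chars.len (PySem.List.pyGetD ws 0 [])
  if length_string < total_length then []
  else
    ws.foldl (fun indices word =>
      pvAWhile s ws length_string total_length word (s.length + 1) indices
        (PySem.Chars.find s word) (PySem.Chars.find s word)) []

-- ===== PORT B =====
-- occurrence positions of w: [j for j in range(n - len(w) + 1) if string.startswith(w, j)]
-- (string.startswith(w, j) ported as startswith on (s.drop j) — exact for 0 ≤ j ≤ len(s), which holds on this range)
def pvOccList (s : List Char) (n : Int) (w : List Char) : List Int :=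
  (PySem.List.pyRange 0 (n - PySem.Chars.len w + 1) 1).filter
    (fun j => PySem.Chars.startswith (List.drop j.toNat s) w)

def find_concat_alt (string : String) (words : List String) : List Int :=
  let s := string.toList
  let ws := words.map String.toList
  let n : Int := PySem.Chars.len s
  let total : Int := PySem.List.len words * PySem.Chars.len (PySem.List.pyGetD ws 0 [])
  if n < total then []
  else
    let occ : PySem.Dict (List Char) (List Int) :=
      ws.foldl (fun d w => d.insert w (pvOccList s n w)) PySem.Dict.empty
    ws.foldl (fun result word =>
      (occ.getD word []).foldl (fun result p =>
        if ws.all (fun w => (occ.getD w []).any fun q =>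
            decide (p ≤ q) && decide (q ≤ p + total - PySem.Chars.len w))
        then result ++ [p] else result) result) []

-- ===== PRECONDITION & SPEC =====
-- A evaluates words[0] first: on words = [] it raises IndexError; Pre_ excludes exactly that.
def Pre_find_concat (string : String) (words : List String) : Prop := words ≠ []
instance (string : String) (words : List String) : Decidable (Pre_find_concat string words) := by unfold Pre_find_concat; infer_instance
def pvWitness_find_concat : String × List String := ("barfoobar", ["foo", "bar"])

-- When every word is the empty string, A's 'start < len(string)' loop guard stops its
-- enumeration of occurrences of '' one position early (position len(string) is never
-- reported, and nothing at all on an empty string), while B reports every position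
-- 0..len(string) for each word, which is where '' genuinely occurs.
def D_find_concat (string : String) (words : List String) : Prop :=
  words ≠ [] ∧ ∀ w ∈ words, w = ""
instance (string : String) (words : List String) : Decidable (D_find_concat string words) := by unfold D_find_concat; infer_instance

def Spec_find_concat (string : String) (words : List String) (out : List Int) : Prop :=
  ¬ D_find_concat string words → out = find_concat_alt string words
instance (string : String) (words : List String) (out : List Int) : Decidable (Spec_find_concat string words out) := by unfold Spec_find_concat; infer_instance

def pvDiffWitness_find_concat : String × List String := ("a", [""])
def pvDiffWitnessOut_find_concat : (List Int) × (List Int) := ([0], [0, 1])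

-- ===== CLAIM (what is proved, stated in full; the proofs are below) =====
def Claim_unchanged_find_concat : Prop := ∀ (string : String) (words : List String), Dom_find_concat string words → Pre_find_concat string words → Spec_find_concat string words (find_concat string words)
def Claim_changed_find_concat : Prop := Dom_find_concat (pvDiffWitness_find_concat.1) (pvDiffWitness_find_concat.2) ∧ Pre_find_concat (pvDiffWitness_find_concat.1) (pvDiffWitness_find_concat.2) ∧ D_find_concat (pvDiffWitness_find_concat.1) (pvDiffWitness_find_concat.2) ∧ find_concat (pvDiffWitness_find_concat.1) (pvDiffWitness_find_concat.2) = pvDiffWitnessOut_find_concat.1 ∧ find_concat_alt (pvDiffWitness_find_concat.1) (pvDiffWitness_find_concat.2) = pvDiffWitnessOut_find_concat.2 ∧ pvDiffWitnessOut_find_concat.1 ≠ pvDiffWitnessOut_find_concat.2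
def Claim_exact_find_concat : Prop := ∀ (string : String) (words : List String), Dom_find_concat string words → Pre_find_concat string words → D_find_concat string words → find_concat string words ≠ find_concat_alt string words

-- ===== LEMMAS AND PROOFS =====

-- occurrence positions ≥ t of w in s, on the Nat side (proof-side normal form of both programs)
def pvOccN (s w : List Char) (t : Nat) : List Nat :=
  (List.range' t (s.length + 1 - w.length - t)).filter (fun j => decide (w <+: List.drop j s))

def pvValidA (s : List Char) (ws : List (List Char)) (total : Int) (p : Int) : Bool :=
  ws.all (fun i => PySem.Chars.isIn i (PySem.List.slice s (some p) (some (total + p))))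

def pvValidB (s : List Char) (ws : List (List Char)) (n total : Int) (p : Int) : Bool :=
  ws.all (fun w => (pvOccList s n w).any fun q =>
    decide (p ≤ q) && decide (q ≤ p + total - PySem.Chars.len w))

theorem pvAllCongrMem {α : Type} (l : List α) (p q : α → Bool)
    (h : ∀ x ∈ l, p x = q x) : l.all p = l.all q := by
  induction l with
  | nil => rfl
  | cons a l ih =>
    simp only [List.all_cons]
    rw [h a (List.mem_cons_self), ih (fun x hx => h x (List.mem_cons_of_mem a hx))]

theorem pvStartswith_eq (x w : List Char) :
    PySem.Chars.startswith x w = decide (w <+: x) := by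
  by_cases h : w <+: x
  · simp [h, (PySem.Chars.startswith_iff x w).mpr h]
  · have hsf : PySem.Chars.startswith x w = false := by
      cases hb : PySem.Chars.startswith x w
      · rfl
      · exact absurd ((PySem.Chars.startswith_iff x w).mp hb) h
    simp [hsf, h]

theorem pvAWhile_append (s : List Char) (ws : List (List Char)) (L T : Int) (w : List Char) :
    ∀ (fuel : Nat) (acc : List Int) (i st : Int),
      pvAWhile s ws L T w fuel acc i st = acc ++ pvAWhile s ws L T w fuel [] i st := by
  intro fuel
  induction fuel with
  | zero => intro acc i st; simp [pvAWhile]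
  | succ fuel ih =>
    intro acc i st
    simp only [pvAWhile]
    split
    · conv_lhs => rw [ih]
      conv_rhs => rw [ih]
      split <;> simp
    · simp

theorem pvOccList_eq (s w : List Char) :
    pvOccList s (s.length : Int) w = (pvOccN s w 0).map (fun j : Nat => (j : Int)) := by
  unfold pvOccList pvOccN
  rw [PySem.Chars.len_eq]
  by_cases h : w.length ≤ s.length + 1
  · have hcast : (s.length : Int) - (w.length : Int) + 1 = ((s.length + 1 - w.length : Nat) : Int) := by
      omega
    rw [hcast, PySem.List.pyRange_zero_natCast, List.filter_map]
    have hr : List.range (s.length + 1 - w.length) = List.range' 0 (s.length + 1 - w.length - 0) := by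
      rw [Nat.sub_zero, List.range_eq_range']
    rw [hr]
    refine congrArg (List.map fun j : Nat => (j : Int)) ?_
    apply List.filter_congr
    intro j _
    simp only [Function.comp, Int.toNat_natCast]
    exact pvStartswith_eq _ w
  · have h1 : PySem.List.pyRange 0 ((s.length : Int) - (w.length : Int) + 1) 1 = [] := by
      rw [List.eq_nil_iff_forall_not_mem]
      intro x hx
      rw [PySem.List.mem_pyRange_one] at hx
      omega
    have h2 : s.length + 1 - w.length - 0 = 0 := by omega
    rw [h1, h2]
    simp

theorem pvOccN_mem {s w : List Char} {t j : Nat} (h : j ∈ pvOccN s w t) :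
    t ≤ j ∧ j + w.length ≤ s.length ∧ w <+: List.drop j s := by
  unfold pvOccN at h
  rw [List.mem_filter, List.mem_range'_1] at h
  obtain ⟨hr, hp⟩ := h
  have hpre : w <+: List.drop j s := by simpa using hp
  have hlen : w.length ≤ (List.drop j s).length := hpre.length_le
  rw [List.length_drop] at hlen
  exact ⟨hr.1, by omega, hpre⟩

theorem pvOccN_nil_of_findFrom_neg (s w : List Char) (t : Nat)
    (ht : t ≤ s.length) (h : PySem.Chars.findFrom s w (t : Int) = -1) :
    pvOccN s w t = [] := by
  have hninf : ¬ w <:+: List.drop t s := (PySem.Chars.findFrom_natCast_eq_neg_one_iff s w t ht).mp h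
  rw [List.eq_nil_iff_forall_not_mem]
  intro j hj
  obtain ⟨htj, _, hpre⟩ := pvOccN_mem hj
  apply hninf
  have hdd : List.drop j s = List.drop (j - t) (List.drop t s) := by
    rw [List.drop_drop]; congr 1; omega
  rw [hdd] at hpre
  exact hpre.isInfix.trans (List.drop_suffix _ _).isInfix

theorem pvOccN_cons_of_findFrom (s w : List Char) (t : Nat) (hw : w ≠ [])
    (ht : t ≤ s.length) (h : 0 ≤ PySem.Chars.findFrom s w (t : Int)) :
    pvOccN s w t = (PySem.Chars.findFrom s w (t : Int)).toNat ::
      pvOccN s w ((PySem.Chars.findFrom s w (t : Int)).toNat + 1) ∧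
    t ≤ (PySem.Chars.findFrom s w (t : Int)).toNat ∧
    (PySem.Chars.findFrom s w (t : Int)).toNat + w.length ≤ s.length := by
  have hne : PySem.Chars.findFrom s w (t : Int) ≠ -1 := by intro hc; rw [hc] at h; norm_num at h
  obtain ⟨hle, hpre, hmin⟩ := PySem.Chars.findFrom_natCast_spec s w t ht hne
  set j := (PySem.Chars.findFrom s w (t : Int)).toNat with hj
  have htj : t ≤ j := by omega
  have hlen : w.length ≤ (List.drop j s).length := hpre.length_le
  rw [List.length_drop] at hlen
  have hwpos : 0 < w.length := by
    cases w with
    | nil => exact absurd rfl hw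
    | cons a l => simp
  have hjn : j + w.length ≤ s.length := by omega
  refine ⟨?_, htj, hjn⟩
  unfold pvOccN
  have hc : s.length + 1 - w.length - t = (j - t) + (s.length + 1 - w.length - j) := by omega
  rw [hc, ← List.range'_append]
  rw [List.filter_append]
  have h1 : (List.range' t (j - t)).filter (fun i => decide (w <+: List.drop i s)) = [] := by
    rw [List.filter_eq_nil_iff]
    intro i hi
    rw [List.mem_range'_1] at hi
    simp only [decide_eq_true_eq]
    exact hmin i hi.1 (by omega)
  rw [h1]
  have h2 : t + 1 * (j - t) = j := by omega
  rw [h2]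
  have hb : s.length + 1 - w.length - j = (s.length + 1 - w.length - (j + 1)) + 1 := by omega
  rw [hb, List.range'_succ, List.filter_cons]
  simp [hpre]

-- window check: w occurs in string[p : p+total]  iff  some occurrence q of w has p ≤ q ≤ p + total - len w
theorem pvWindow_iff (s w : List Char) (total : Int) (htot : 0 ≤ total) (p : Nat) (hp : p ≤ s.length) :
    PySem.Chars.isIn w (PySem.List.slice s (some (p : Int)) (some (total + (p : Int)))) =
      ((pvOccN s w 0).map (fun j : Nat => (j : Int))).any
        (fun q => decide ((p : Int) ≤ q) && decide (q ≤ (p : Int) + total - PySem.Chars.len w)) := by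
  have hT : total + (p : Int) = ((p : Nat) : Int) + ((total.toNat : Nat) : Int) := by omega
  rw [hT, PySem.List.slice_natCast_add, Bool.eq_iff_iff, ← PySem.Chars.exists_prefix_drop_iff_isIn,
    List.any_eq_true]
  simp only [PySem.Chars.len_eq, List.mem_map, Bool.and_eq_true, decide_eq_true_eq]
  constructor
  · rintro ⟨j, hj⟩
    rw [List.drop_take, List.drop_drop] at hj
    by_cases hw : w = []
    · subst hw
      refine ⟨(p : Int), ⟨p, ?_, rfl⟩, by exact_mod_cast le_refl _, ?_⟩
      · unfold pvOccN
        rw [List.mem_filter, List.mem_range'_1]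
        refine ⟨⟨Nat.zero_le _, by simp only [List.length_nil]; omega⟩, by simp⟩
      · simp only [List.length_nil, Nat.cast_zero]
        omega
    · rw [List.prefix_take_iff] at hj
      obtain ⟨hpre, hlen⟩ := hj
      have hwpos : 0 < w.length := by
        cases w with
        | nil => exact absurd rfl hw
        | cons a l => simp
      have hlen2 : w.length ≤ (List.drop (p + j) s).length := hpre.length_le
      rw [List.length_drop] at hlen2
      have hq : p + j + w.length ≤ s.length := by omega
      refine ⟨((p + j : Nat) : Int), ⟨p + j, ?_, rfl⟩, by exact_mod_cast Nat.le_add_right p j, ?_⟩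
      · unfold pvOccN
        rw [List.mem_filter, List.mem_range'_1]
        exact ⟨⟨Nat.zero_le _, by omega⟩, by simpa using hpre⟩
      · have hjT : w.length + j ≤ total.toNat := by omega
        push_cast
        omega
  · rintro ⟨q, ⟨j, hjmem, rfl⟩, hq1, hq2⟩
    obtain ⟨_, hjn, hpre⟩ := pvOccN_mem hjmem
    have hpj : p ≤ j := by exact_mod_cast hq1
    have hjT : j + w.length ≤ p + total.toNat := by
      have h2 := hq2; push_cast at h2; omega
    refine ⟨j - p, ?_⟩
    rw [List.drop_take, List.drop_drop]
    have hpj' : p + (j - p) = j := by omega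
    rw [hpj', List.prefix_take_iff]
    exact ⟨hpre, by omega⟩

theorem pvValid_eq (s : List Char) (ws : List (List Char)) (total : Int) (htot : 0 ≤ total)
    (p : Nat) (hp : p ≤ s.length) :
    pvValidA s ws total (p : Int) = pvValidB s ws (s.length : Int) total (p : Int) := by
  unfold pvValidA pvValidB
  apply pvAllCongrMem
  intro w _
  rw [pvOccList_eq]
  exact pvWindow_iff s w total htot p hp

-- A's find-chain for a nonempty word enumerates exactly the occurrences ≥ t
theorem pvChain (s : List Char) (ws : List (List Char)) (T : Int) (w : List Char) (hw : w ≠ []) :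
    ∀ (fuel t : Nat) (st : Int), t ≤ s.length → s.length - t < fuel →
      (0 ≤ PySem.Chars.findFrom s w (t : Int) → st ≤ PySem.Chars.findFrom s w (t : Int)) →
      pvAWhile s ws (s.length : Int) T w fuel [] (PySem.Chars.findFrom s w (t : Int)) st =
        ((pvOccN s w t).filter (fun j : Nat => pvValidA s ws T (j : Int))).map (fun j : Nat => (j : Int)) := by
  intro fuel
  induction fuel with
  | zero => intro t st ht hf hst; omega
  | succ fuel ih =>
    intro t st ht hf hst
    have hchar := PySem.Chars.findFrom_natCast s w t ht
    by_cases hf1 : PySem.Chars.find (List.drop t s) w = -1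
    · have hneg : PySem.Chars.findFrom s w (t : Int) = -1 := by rw [hchar, if_pos hf1]
      rw [hneg]
      rw [pvOccN_nil_of_findFrom_neg s w t ht hneg]
      simp only [pvAWhile]
      rw [if_neg (by rintro ⟨_, hc⟩; omega)]
      simp
    · have hfnn : 0 ≤ PySem.Chars.find (List.drop t s) w := by
        have := PySem.Chars.neg_one_le_find (List.drop t s) w
        omega
      have h0 : 0 ≤ PySem.Chars.findFrom s w (t : Int) := by
        rw [hchar, if_neg hf1]
        omega
      obtain ⟨hocc, htj, hjn⟩ := pvOccN_cons_of_findFrom s w t hw ht h0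
      set j := (PySem.Chars.findFrom s w (t : Int)).toNat with hjdef
      have hFj : PySem.Chars.findFrom s w (t : Int) = (j : Int) := by omega
      have hwpos : 0 < w.length := by
        cases w with
        | nil => exact absurd rfl hw
        | cons a l => simp
      have hjlt : j < s.length := by omega
      simp only [pvAWhile]
      rw [if_pos ⟨by have := hst h0; omega, h0⟩]
      rw [pvAWhile_append]
      have hsucc : PySem.Chars.findFrom s w (t : Int) + 1 = ((j + 1 : Nat) : Int) := by
        rw [hFj]; push_cast; ring
      rw [hsucc]
      rw [ih (j + 1) ((j + 1 : Nat) : Int) (by omega) (by omega)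
        (fun h0' => by
          have hne' : PySem.Chars.findFrom s w ((j + 1 : Nat) : Int) ≠ -1 := by omega
          exact (PySem.Chars.findFrom_natCast_spec s w (j + 1) (by omega) hne').1)]
      rw [hocc, List.filter_cons]
      rw [hFj]
      by_cases hval : pvValidA s ws T ((j : Nat) : Int) = true
      · have hval' : (ws.all fun i =>
            PySem.Chars.isIn i (PySem.List.slice s (some ((j : Nat) : Int)) (some (T + ((j : Nat) : Int))))) = true := hval
        rw [hval']
        simp [hval]
      · have hval' : (ws.all fun i =>
            PySem.Chars.isIn i (PySem.List.slice s (some ((j : Nat) : Int)) (some (T + ((j : Nat) : Int))))) = false :=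
          Bool.not_eq_true _ ▸ eq_false_of_ne_true hval
        rw [hval']
        simp [hval]

-- A's find-chain for the empty word enumerates positions t, t+1, …, len-1
theorem pvChainNil (s : List Char) (ws : List (List Char)) (T : Int) :
    ∀ (fuel t : Nat), t ≤ s.length → s.length - t < fuel →
      pvAWhile s ws (s.length : Int) T [] fuel [] (t : Int) (t : Int) =
        ((List.range' t (s.length - t)).filter (fun j : Nat => pvValidA s ws T (j : Int))).map
          (fun j : Nat => (j : Int)) := by
  intro fuel
  induction fuel with
  | zero => intro t ht hf; omega
  | succ fuel ih =>
    intro t ht hf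
    by_cases htn : t < s.length
    · simp only [pvAWhile]
      rw [if_pos ⟨by exact_mod_cast htn, by positivity⟩]
      rw [pvAWhile_append]
      have h1 : (t : Int) + 1 = ((t + 1 : Nat) : Int) := by push_cast; ring
      have hff : PySem.Chars.findFrom s [] ((t + 1 : Nat) : Int) = ((t + 1 : Nat) : Int) := by
        rw [PySem.Chars.findFrom_natCast s [] (t + 1) (by omega), PySem.Chars.find_nil]
        norm_num
      rw [h1, hff]
      rw [ih (t + 1) (by omega) (by omega)]
      have hr : s.length - t = (s.length - (t + 1)) + 1 := by omega
      rw [hr, List.range'_succ, List.filter_cons]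
      by_cases hval : pvValidA s ws T ((t : Nat) : Int) = true
      · have hval' : (ws.all fun i =>
            PySem.Chars.isIn i (PySem.List.slice s (some ((t : Nat) : Int)) (some (T + ((t : Nat) : Int))))) = true := hval
        rw [hval']
        simp [hval]
      · have hval' : (ws.all fun i =>
            PySem.Chars.isIn i (PySem.List.slice s (some ((t : Nat) : Int)) (some (T + ((t : Nat) : Int))))) = false :=
          Bool.not_eq_true _ ▸ eq_false_of_ne_true hval
        rw [hval']
        simp [hval]
    · have htn' : t = s.length := by omega
      simp only [pvAWhile]
      rw [if_neg (by rintro ⟨hc, _⟩; rw [htn'] at hc; omega)]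
      rw [htn']
      simp

theorem pvDictGet (s : List Char) (n : Int) :
    ∀ (ws : List (List Char)) (d : PySem.Dict (List Char) (List Int)) (k : List Char),
      (k ∈ ws ∨ d.get? k = some (pvOccList s n k)) →
      (ws.foldl (fun d w => d.insert w (pvOccList s n w)) d).get? k = some (pvOccList s n k) := by
  intro ws
  induction ws with
  | nil =>
    intro d k h
    rcases h with h | h
    · simp at h
    · simpa using h
  | cons w ws ih =>
    intro d k h
    simp only [List.foldl_cons]
    apply ih
    by_cases hk : k = w
    · subst hk
      exact Or.inr (PySem.Dict.get?_insert_self d k _)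
    · rcases h with h | h
      · rcases List.mem_cons.mp h with h' | h'
        · exact absurd h' hk
        · exact Or.inl h'
      · exact Or.inr (by rw [PySem.Dict.get?_insert_of_ne d _ hk, h])

theorem pvDict_getD (s : List Char) (n : Int) (ws : List (List Char)) (k : List Char)
    (h : k ∈ ws) :
    (ws.foldl (fun d w => d.insert w (pvOccList s n w)) PySem.Dict.empty).getD k [] =
      pvOccList s n k := by
  have hg := pvDictGet s n ws PySem.Dict.empty k (Or.inl h)
  show ((ws.foldl (fun d w => d.insert w (pvOccList s n w)) PySem.Dict.empty).get? k).getD [] =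
    pvOccList s n k
  rw [hg]
  rfl


theorem pvStrNe (u : String) (hne : u ≠ "") : u.toList ≠ [] := by
  intro hnil
  apply hne
  have h2 : u.toList = ("" : String).toList := by simpa using hnil
  exact String.toList_inj.mp h2

-- the whole non-degenerate case: A's word-major find-chain scan equals B's dict-of-occurrences scan
theorem pvMain (s : List Char) (WS : List (List Char)) (T : Int) (htot : 0 ≤ T)
    (hex : ∃ v ∈ WS, v ≠ []) :
    WS.foldl (fun indices word => pvAWhile s WS ((s.length : Nat) : Int) T word (s.length + 1) indices
      (PySem.Chars.find s word) (PySem.Chars.find s word)) [] =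
    WS.foldl (fun result word =>
      ((WS.foldl (fun d w => d.insert w (pvOccList s ((s.length : Nat) : Int) w))
          PySem.Dict.empty).getD word []).foldl
        (fun r p => if WS.all (fun w =>
            ((WS.foldl (fun d w => d.insert w (pvOccList s ((s.length : Nat) : Int) w))
                PySem.Dict.empty).getD w []).any
              fun q => decide (p ≤ q) && decide (q ≤ p + T - ((w.length : Nat) : Int)))
          then r ++ [p] else r) result) [] := by
  have hdict : ∀ k ∈ WS,
      (WS.foldl (fun d w => d.insert w (pvOccList s ((s.length : Nat) : Int) w))
        PySem.Dict.empty).getD k [] = pvOccList s ((s.length : Nat) : Int) k :=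
    fun k hk => pvDict_getD s _ WS k hk
  have hcond : ∀ p : Int, (WS.all (fun w =>
      ((WS.foldl (fun d w => d.insert w (pvOccList s ((s.length : Nat) : Int) w))
          PySem.Dict.empty).getD w []).any
        fun q => decide (p ≤ q) && decide (q ≤ p + T - ((w.length : Nat) : Int))))
      = pvValidB s WS ((s.length : Nat) : Int) T p := by
    intro p
    unfold pvValidB
    apply pvAllCongrMem
    intro w hw
    rw [hdict w hw]
    simp only [PySem.Chars.len_eq]
    rfl
  have hB : WS.foldl (fun result word =>
      ((WS.foldl (fun d w => d.insert w (pvOccList s ((s.length : Nat) : Int) w))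
          PySem.Dict.empty).getD word []).foldl
        (fun r p => if WS.all (fun w =>
            ((WS.foldl (fun d w => d.insert w (pvOccList s ((s.length : Nat) : Int) w))
                PySem.Dict.empty).getD w []).any
              fun q => decide (p ≤ q) && decide (q ≤ p + T - ((w.length : Nat) : Int)))
          then r ++ [p] else r) result) [] =
      WS.foldl (fun acc word => acc ++ (pvOccList s ((s.length : Nat) : Int) word).filter
        (fun p => pvValidB s WS ((s.length : Nat) : Int) T p)) [] := by
    apply PySem.List.foldl_congr_mem
    intro acc word hword
    rw [hdict word hword]
    have hfn : (fun (r : List Int) (p : Int) => if (WS.all (fun w =>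
        ((WS.foldl (fun d w => d.insert w (pvOccList s ((s.length : Nat) : Int) w))
            PySem.Dict.empty).getD w []).any
          fun q => decide (p ≤ q) && decide (q ≤ p + T - ((w.length : Nat) : Int)))) = true
        then r ++ [p] else r) =
        fun r p => if pvValidB s WS ((s.length : Nat) : Int) T p = true then r ++ [p] else r := by
      funext r p
      rw [hcond p]
    rw [hfn, PySem.List.foldl_append_if]
    simp
  have hA : WS.foldl (fun indices word => pvAWhile s WS ((s.length : Nat) : Int) T word (s.length + 1) indices
      (PySem.Chars.find s word) (PySem.Chars.find s word)) [] =
      WS.foldl (fun acc word => acc ++ (pvOccList s ((s.length : Nat) : Int) word).filter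
        (fun p => pvValidB s WS ((s.length : Nat) : Int) T p)) [] := by
    apply PySem.List.foldl_congr_mem
    intro acc word hword
    rw [pvAWhile_append]
    congr 1
    by_cases hwnil : word = []
    · subst hwnil
      rw [PySem.Chars.find_nil]
      have hchain := pvChainNil s WS T (s.length + 1) 0 (Nat.zero_le _) (by omega)
      simp only [Nat.cast_zero, Nat.sub_zero] at hchain
      rw [hchain, pvOccList_eq, List.filter_map]
      have hocc : pvOccN s [] 0 = List.range' 0 (s.length + 1) := by
        unfold pvOccN
        simp
      rw [hocc]
      have hsplit : List.range' 0 (s.length + 1) = List.range' 0 s.length ++ [s.length] := by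
        have h := List.range'_concat (s := 0) (n := s.length) (step := 1)
        simpa using h
      rw [hsplit, List.filter_append]
      have hlast : List.filter ((fun p : Int => pvValidB s WS ((s.length : Nat) : Int) T p) ∘
          (fun j : Nat => (j : Int))) [s.length] = [] := by
        simp only [List.filter_cons, List.filter_nil, Function.comp_apply]
        rw [if_neg]
        intro hcv
        obtain ⟨v, hvmem, hvne⟩ := hex
        unfold pvValidB at hcv
        have hv := List.all_eq_true.mp hcv v hvmem
        rw [List.any_eq_true] at hv
        obtain ⟨q, hqmem, hq⟩ := hv
        rw [pvOccList_eq] at hqmem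
        obtain ⟨j, hjmem, rfl⟩ := List.mem_map.mp hqmem
        obtain ⟨_, hjn, _⟩ := pvOccN_mem hjmem
        have hvpos : 0 < v.length := by
          cases v with
          | nil => exact absurd rfl hvne
          | cons a l => simp
        simp only [Bool.and_eq_true, decide_eq_true_eq] at hq
        have hsj : s.length ≤ j := by exact_mod_cast hq.1
        omega
      rw [hlast, List.append_nil]
      refine congrArg (List.map fun j : Nat => (j : Int)) ?_
      apply List.filter_congr
      intro j hj
      rw [List.mem_range'_1] at hj
      simp only [Function.comp_apply]
      exact pvValid_eq s WS T htot j (by omega)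
    · have hfind : PySem.Chars.find s word = PySem.Chars.findFrom s word ((0 : Nat) : Int) := by
        rw [show ((0 : Nat) : Int) = (0 : Int) by norm_num, PySem.Chars.findFrom_zero]
      rw [hfind]
      rw [pvChain s WS T word hwnil (s.length + 1) 0 _ (Nat.zero_le _) (by omega) (fun _ => le_refl _)]
      rw [pvOccList_eq, List.filter_map]
      refine congrArg (List.map fun j : Nat => (j : Int)) ?_
      apply List.filter_congr
      intro j hj
      obtain ⟨_, hjn, _⟩ := pvOccN_mem hj
      simp only [Function.comp_apply]
      exact pvValid_eq s WS T htot j (by omega)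
  rw [hA, hB]

-- the all-words-empty case: A misses position len(s), so the sides differ in length
theorem pvMainNil (s : List Char) (WS : List (List Char)) (hne : WS ≠ [])
    (hall : ∀ v ∈ WS, v = []) :
    WS.foldl (fun indices word => pvAWhile s WS ((s.length : Nat) : Int) 0 word (s.length + 1) indices
      (PySem.Chars.find s word) (PySem.Chars.find s word)) [] ≠
    WS.foldl (fun result word =>
      ((WS.foldl (fun d w => d.insert w (pvOccList s ((s.length : Nat) : Int) w))
          PySem.Dict.empty).getD word []).foldl
        (fun r p => if WS.all (fun w =>
            ((WS.foldl (fun d w => d.insert w (pvOccList s ((s.length : Nat) : Int) w))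
                PySem.Dict.empty).getD w []).any
              fun q => decide (p ≤ q) && decide (q ≤ p + 0 - ((w.length : Nat) : Int)))
          then r ++ [p] else r) result) [] := by
  have hdict : ∀ k ∈ WS,
      (WS.foldl (fun d w => d.insert w (pvOccList s ((s.length : Nat) : Int) w))
        PySem.Dict.empty).getD k [] = pvOccList s ((s.length : Nat) : Int) k :=
    fun k hk => pvDict_getD s _ WS k hk
  have hocc : pvOccN s [] 0 = List.range' 0 (s.length + 1) := by
    unfold pvOccN
    simp
  have hvalA : ∀ j : Nat, pvValidA s WS 0 (j : Int) = true := by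
    intro j
    unfold pvValidA
    rw [List.all_eq_true]
    intro i hi
    rw [hall i hi]
    exact PySem.Chars.isIn_nil _
  have hvalB : ∀ j : Nat, j < s.length + 1 → pvValidB s WS ((s.length : Nat) : Int) 0 (j : Int) = true := by
    intro j hjn
    unfold pvValidB
    rw [List.all_eq_true]
    intro w hw
    rw [hall w hw, List.any_eq_true, pvOccList_eq, hocc]
    refine ⟨(j : Int), List.mem_map.mpr ⟨j, List.mem_range'_1.mpr ⟨Nat.zero_le _, by omega⟩, rfl⟩, ?_⟩
    simp [PySem.Chars.len_eq]
  have hA : WS.foldl (fun indices word => pvAWhile s WS ((s.length : Nat) : Int) 0 word (s.length + 1) indices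
      (PySem.Chars.find s word) (PySem.Chars.find s word)) [] =
      WS.foldl (fun acc _ => acc ++ (List.range' 0 s.length).map (fun j : Nat => (j : Int))) [] := by
    apply PySem.List.foldl_congr_mem
    intro acc word hword
    rw [hall word hword, PySem.Chars.find_nil, pvAWhile_append]
    congr 1
    have hchain := pvChainNil s WS 0 (s.length + 1) 0 (Nat.zero_le _) (by omega)
    simp only [Nat.cast_zero, Nat.sub_zero] at hchain
    rw [hchain]
    rw [List.filter_congr (fun j _ => hvalA j), List.filter_true]
  have hB : WS.foldl (fun result word =>
      ((WS.foldl (fun d w => d.insert w (pvOccList s ((s.length : Nat) : Int) w))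
          PySem.Dict.empty).getD word []).foldl
        (fun r p => if WS.all (fun w =>
            ((WS.foldl (fun d w => d.insert w (pvOccList s ((s.length : Nat) : Int) w))
                PySem.Dict.empty).getD w []).any
              fun q => decide (p ≤ q) && decide (q ≤ p + 0 - ((w.length : Nat) : Int)))
          then r ++ [p] else r) result) [] =
      WS.foldl (fun acc _ => acc ++ (List.range' 0 (s.length + 1)).map (fun j : Nat => (j : Int))) [] := by
    apply PySem.List.foldl_congr_mem
    intro acc word hword
    rw [hdict word hword]
    have hcond : ∀ p : Int, (WS.all (fun w =>
        ((WS.foldl (fun d w => d.insert w (pvOccList s ((s.length : Nat) : Int) w))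
            PySem.Dict.empty).getD w []).any
          fun q => decide (p ≤ q) && decide (q ≤ p + 0 - ((w.length : Nat) : Int))))
        = pvValidB s WS ((s.length : Nat) : Int) 0 p := by
      intro p
      unfold pvValidB
      apply pvAllCongrMem
      intro w hw
      rw [hdict w hw]
      simp [PySem.Chars.len_eq]
    have hfn : (fun (r : List Int) (p : Int) => if (WS.all (fun w =>
        ((WS.foldl (fun d w => d.insert w (pvOccList s ((s.length : Nat) : Int) w))
            PySem.Dict.empty).getD w []).any
          fun q => decide (p ≤ q) && decide (q ≤ p + 0 - ((w.length : Nat) : Int)))) = true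
        then r ++ [p] else r) =
        fun r p => if pvValidB s WS ((s.length : Nat) : Int) 0 p = true then r ++ [p] else r := by
      funext r p
      rw [hcond p]
    rw [hfn, PySem.List.foldl_append_if]
    rw [hall word hword, pvOccList_eq, hocc]
    have hfull : List.filter ((fun p : Int => pvValidB s WS ((s.length : Nat) : Int) 0 p) ∘
        (fun j : Nat => (j : Int))) (List.range' 0 (s.length + 1)) = List.range' 0 (s.length + 1) := by
      rw [List.filter_congr (q := fun _ => true) ?_, List.filter_true]
      intro j hj
      rw [List.mem_range'_1] at hj
      simp only [Function.comp_apply]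
      simp [hvalB j (by omega)]
    rw [List.filter_map, hfull]
    simp
  rw [hA, hB, PySem.List.foldl_append_eq_flatMap, PySem.List.foldl_append_eq_flatMap]
  intro heq
  have hlen := congrArg List.length heq
  simp only [List.nil_append, List.length_flatMap, List.length_map, List.length_range'] at hlen
  have hpos : 0 < WS.length := List.length_pos_of_ne_nil hne
  have hsum : ∀ (m : Nat), ((WS.map (fun _ => m)).sum) = WS.length * m := by
    intro m
    rw [List.map_const', List.sum_replicate, smul_eq_mul]
  rw [hsum, hsum] at hlen
  have hlt : WS.length * s.length < WS.length * (s.length + 1) := by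
    calc WS.length * s.length < WS.length * s.length + WS.length := by omega
    _ = WS.length * (s.length + 1) := by ring
  omega

-- ===== VERDICT (by name: the statement is the Claim_ definition above) =====
theorem find_concat_spec : Claim_unchanged_find_concat := by
  intro string words _hdom hpre hnd
  obtain ⟨w0, rest, rfl⟩ : ∃ w0 rest, words = w0 :: rest := by
    cases words with
    | nil => exact absurd rfl hpre
    | cons a l => exact ⟨a, l, rfl⟩
  have hex : ∃ w' ∈ w0 :: rest, w' ≠ "" := by
    by_contra hc
    exact hnd ⟨hpre, fun w hw => not_not.mp (fun hne => hc ⟨w, hw, hne⟩)⟩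
  have hexWS : ∃ v ∈ String.toList w0 :: List.map String.toList rest, v ≠ [] := by
    obtain ⟨w', hmem, hne⟩ := hex
    refine ⟨String.toList w', ?_, pvStrNe w' hne⟩
    rcases List.mem_cons.mp hmem with h | h
    · subst h; exact List.mem_cons_self
    · exact List.mem_cons_of_mem _ (List.mem_map.mpr ⟨w', h, rfl⟩)
  show find_concat string (w0 :: rest) = find_concat_alt string (w0 :: rest)
  unfold find_concat find_concat_alt
  simp only [List.map_cons, PySem.Chars.len_eq, PySem.List.len_eq, PySem.List.pyGetD_zero_cons]
  by_cases hlt : ((string.toList.length : Nat) : Int) <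
      (((w0 :: rest).length : Nat) : Int) * (((String.toList w0).length : Nat) : Int)
  · rw [if_pos hlt, if_pos hlt]
  · rw [if_neg hlt, if_neg hlt]
    exact pvMain string.toList (String.toList w0 :: List.map String.toList rest) _
      (by positivity) hexWS

theorem find_concat_changed : Claim_changed_find_concat := by
  unfold Claim_changed_find_concat; decide

theorem find_concat_tight : Claim_exact_find_concat := by
  intro string words _hdom hpre hD
  obtain ⟨_, hall⟩ := hD
  obtain ⟨w0, rest, rfl⟩ : ∃ w0 rest, words = w0 :: rest := by
    cases words with
    | nil => exact absurd rfl hpre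
    | cons a l => exact ⟨a, l, rfl⟩
  have hw0 : w0 = "" := hall w0 List.mem_cons_self
  subst hw0
  have hallWS : ∀ v ∈ String.toList ("" : String) :: List.map String.toList rest, v = [] := by
    intro v hv
    rcases List.mem_cons.mp hv with h | h
    · subst h; rfl
    · obtain ⟨w, hw, rfl⟩ := List.mem_map.mp h
      rw [hall w (List.mem_cons_of_mem _ hw)]
      rfl
  unfold find_concat find_concat_alt
  simp only [List.map_cons, PySem.Chars.len_eq, PySem.List.len_eq, PySem.List.pyGetD_zero_cons]
  have h0 : (((String.toList ("" : String)).length : Nat) : Int) = 0 := by norm_num [String.toList]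
  rw [h0, mul_zero]
  rw [if_neg (not_lt.mpr (by positivity)), if_neg (not_lt.mpr (by positivity))]
  exact pvMainNil string.toList (String.toList ("" : String) :: List.map String.toList rest)
    (by simp) hallWS
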